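-- pv_equiv track=rewrite | github.com/DanielBoxer/BlenDir | src/utils.py | get_invalid_char
-- ===== SOURCE A (Python) =====
-- def get_invalid_char(line, skip_keywords=False):
--     invalid = '\/:*?"<>|.'
--     if skip_keywords:
--         if line.strip().startswith("//"):
--             return None
--         invalid = invalid.replace("*", "")
--     # check for invalid characters
--     if any(char in line for char in invalid):
--         # if found, check which one it is
--         for c1 in line:
--             for c2 in invalid:
--                 if c1 == c2:
--                     return c1
--     else:
--         return None
-- ===== SOURCE B (Python) =====
-- def get_invalid_char(line, skip_keywords=False):
--     invalid = '\/:*?"<>|.'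
--     if skip_keywords:
--         if line.strip().startswith("//"):
--             return None
--         invalid = invalid.replace("*", "")
--     # locate each invalid character with str.find and keep the smallest index
--     best = None
--     for c in invalid:
--         i = line.find(c)
--         if i != -1 and (best is None or i < best):
--             best = i
--     return line[best] if best is not None else None
-- ===== Notes on version B (the rewrite author's own statement) =====
-- stated objective: alternative
-- what changed: B loops over the small fixed invalid-character alphabet, locating each character once with str.find and keeping the minimum index, instead of A's any() pre-scan over the line followed by a nested line-by-invalid double loop.
import Mathlib
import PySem

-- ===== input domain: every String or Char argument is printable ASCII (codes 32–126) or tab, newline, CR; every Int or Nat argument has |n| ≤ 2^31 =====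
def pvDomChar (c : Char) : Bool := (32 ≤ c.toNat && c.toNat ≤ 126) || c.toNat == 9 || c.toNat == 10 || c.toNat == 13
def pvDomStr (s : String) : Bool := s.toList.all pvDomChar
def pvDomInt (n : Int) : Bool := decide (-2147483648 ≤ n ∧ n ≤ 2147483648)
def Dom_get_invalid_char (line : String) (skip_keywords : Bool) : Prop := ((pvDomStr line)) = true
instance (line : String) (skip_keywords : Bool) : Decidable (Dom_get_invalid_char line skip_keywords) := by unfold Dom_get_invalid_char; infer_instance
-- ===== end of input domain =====

-- B scans the fixed invalid alphabet with one str.find per character and keeps the minimum index,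
-- instead of A's any() pre-scan plus nested line-by-invalid double loop (alternative algorithm; same results).

-- ===== PORT A =====
-- invalid = '\/:*?"<>|.' (Python keeps the backslash: 10 characters)
def pvInvalidBase : String := "\\/:*?\"<>|."

-- inner 'for c2 in invalid: if c1 == c2: return c1'
def pvGicInner (c1 : Char) : List Char → Option String
  | [] => none
  | c2 :: rest => if c1 = c2 then some (String.ofList [c1]) else pvGicInner c1 rest

-- outer 'for c1 in line: …' (falls through to implicit None)
def pvGicOuter (inv : List Char) : List Char → Option String
  | [] => none
  | c1 :: rest =>
    match pvGicInner c1 inv with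
    | some s => some s
    | none => pvGicOuter inv rest

def get_invalid_char (line : String) (skip_keywords : Bool) : Option String :=
  let invalid := pvInvalidBase
  if skip_keywords then
    if PySem.Str.startswith (PySem.Str.strip line) "//" then none
    else
      let invalid := PySem.Str.replace invalid "*" ""
      if invalid.toList.any (fun ch => line.toList.contains ch) then
        pvGicOuter invalid.toList line.toList
      else none
  else
    if invalid.toList.any (fun ch => line.toList.contains ch) then
      pvGicOuter invalid.toList line.toList
    else none

-- ===== PORT B =====
-- 'for c in invalid: i = line.find(c); if i != -1 and (best is None or i < best): best = i'
def pvBestLoop (line : String) : List Char → Option Int → Option Int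
  | [], best => best
  | c :: rest, best =>
    let i := PySem.Str.find line (String.ofList [c])
    if i != -1 && best.all (fun b => i < b) then pvBestLoop line rest (some i)
    else pvBestLoop line rest best

-- 'return line[best] if best is not None else None'
def pvGicB (line : String) (inv : String) : Option String :=
  match pvBestLoop line inv.toList none with
  | some b => (PySem.Str.pyGet? line b).map (fun ch => String.ofList [ch])
  | none => none

def get_invalid_char_alt (line : String) (skip_keywords : Bool) : Option String :=
  let invalid := pvInvalidBase
  if skip_keywords then
    if PySem.Str.startswith (PySem.Str.strip line) "//" then none
    else pvGicB line (PySem.Str.replace invalid "*" "")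
  else pvGicB line invalid

-- ===== PRECONDITION & SPEC =====
def Spec_get_invalid_char (line : String) (skip_keywords : Bool) (out : Option String) : Prop := out = get_invalid_char_alt line skip_keywords
instance (line : String) (skip_keywords : Bool) (out : Option String) : Decidable (Spec_get_invalid_char line skip_keywords out) := by unfold Spec_get_invalid_char; infer_instance

-- ===== CLAIM (what is proved, stated in full; the proofs are below) =====
def Claim_equal_get_invalid_char : Prop := ∀ (line : String) (skip_keywords : Bool), Dom_get_invalid_char line skip_keywords → Spec_get_invalid_char line skip_keywords (get_invalid_char line skip_keywords)

-- ===== LEMMAS AND PROOFS =====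

-- the single forward pass both programs are compared against
def pvGicFind (inv : List Char) : List Char → Option String
  | [] => none
  | c :: rest => if c ∈ inv then some (String.ofList [c]) else pvGicFind inv rest

-- min on Option Int (none = +∞)
def pvOmin : Option Int → Option Int → Option Int
  | none, y => y
  | some a, none => some a
  | some a, some b => some (min a b)

-- proof-side shape of B's loop without the accumulator
def pvM (l : List Char) : List Char → Option Int
  | [] => none
  | c :: rest =>
    pvOmin (if PySem.Chars.find l [c] = -1 then none else some (PySem.Chars.find l [c])) (pvM l rest)

-- ---- A side: the inner loop is membership; the double loop is the forward pass ----
theorem pvGicInner_eq (c1 : Char) (inv : List Char) :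
    pvGicInner c1 inv = if c1 ∈ inv then some (String.ofList [c1]) else none := by
  induction inv with
  | nil => simp [pvGicInner]
  | cons c2 rest ih => by_cases h : c1 = c2 <;> simp [pvGicInner, h, ih]

theorem pvGicOuter_eq_find (inv l : List Char) : pvGicOuter inv l = pvGicFind inv l := by
  induction l with
  | nil => rfl
  | cons c rest ih =>
    by_cases h : c ∈ inv <;> simp [pvGicOuter, pvGicFind, pvGicInner_eq, h, ih]

theorem pvGicFind_none (inv l : List Char)
    (h : ∀ x ∈ inv, x ∉ l) : pvGicFind inv l = none := by
  induction l with
  | nil => rfl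
  | cons c rest ih =>
    by_cases hc : c ∈ inv
    · exact absurd (List.mem_cons_self) (h c hc)
    · simp only [pvGicFind, if_neg hc]
      exact ih (fun x hx hxr => h x hx (List.mem_cons_of_mem _ hxr))

theorem pvGic_branch (inv l : List Char) :
    (if inv.any (fun ch => l.contains ch) then pvGicOuter inv l else none) = pvGicFind inv l := by
  by_cases h : inv.any (fun ch => l.contains ch) = true
  · rw [if_pos h]; exact pvGicOuter_eq_find inv l
  · rw [if_neg h]
    simp only [List.any_eq_true, List.contains_eq_mem, decide_eq_true_eq, not_exists, not_and] at h
    exact (pvGicFind_none inv l h).symm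

-- ---- facts about find on a singleton pattern ----
theorem pv_singleton_prefix (c : Char) (l : List Char) : [c] <+: l ↔ l[0]? = some c := by
  constructor
  · rintro ⟨t, rfl⟩; simp
  · intro h
    cases l with
    | nil => simp at h
    | cons a t => simp at h; exact ⟨t, by simp [h]⟩

theorem pv_find_neg_iff (l : List Char) (c : Char) :
    PySem.Chars.find l [c] = -1 ↔ c ∉ l := by
  rw [PySem.Chars.find_eq_neg_one_iff, List.singleton_infix_iff]

theorem pv_find_spec (l : List Char) (c : Char) (h : PySem.Chars.find l [c] ≠ -1) :
    0 ≤ PySem.Chars.find l [c] ∧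
    l[(PySem.Chars.find l [c]).toNat]? = some c ∧
    ∀ j < (PySem.Chars.find l [c]).toNat, l[j]? ≠ some c := by
  have hnn : 0 ≤ PySem.Chars.find l [c] := by
    have := PySem.Chars.neg_one_le_find l [c]; omega
  obtain ⟨h1, h2⟩ := PySem.Chars.find_spec (s := l) (sub := [c]) hnn
  refine ⟨hnn, ?_, ?_⟩
  · have := (pv_singleton_prefix c _).mp h1
    simpa [List.getElem?_drop] using this
  · intro j hj hco
    exact h2 j hj ((pv_singleton_prefix c _).mpr (by simpa [List.getElem?_drop] using hco))

-- ---- pvOmin algebra ----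
theorem pvOmin_none_left (x : Option Int) : pvOmin none x = x := rfl

theorem pvOmin_absorb_lt (b i : Int) (x : Option Int) (h : i < b) :
    pvOmin (some b) (pvOmin (some i) x) = pvOmin (some i) x := by
  cases x with
  | none => simp [pvOmin]; omega
  | some m => simp [pvOmin]; omega

theorem pvOmin_absorb_le (b i : Int) (x : Option Int) (h : b ≤ i) :
    pvOmin (some b) (pvOmin (some i) x) = pvOmin (some b) x := by
  cases x with
  | none => simp [pvOmin]; omega
  | some m => simp [pvOmin]; omega

-- ---- B's loop computes pvOmin best (pvM …) ----
theorem pv_toList_mk (c : Char) : (String.ofList [c]).toList = [c] := by simp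

theorem pvBestLoop_eq (line : String) (inv : List Char) :
    ∀ best, pvBestLoop line inv best = pvOmin best (pvM line.toList inv) := by
  induction inv with
  | nil => intro best; cases best <;> rfl
  | cons c rest ih =>
    intro best
    simp only [pvBestLoop, PySem.Str.find_eq, pv_toList_mk]
    by_cases hi : PySem.Chars.find line.toList [c] = -1
    · have hc : (PySem.Chars.find line.toList [c] != -1 &&
          Option.all (fun b => decide (PySem.Chars.find line.toList [c] < b)) best) = false := by
        simp [hi]
      rw [hc, if_neg (by simp : ¬ (false = true))]
      simp [pvM, hi, ih, pvOmin_none_left]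
    · cases best with
      | none =>
        have hc : (PySem.Chars.find line.toList [c] != -1 &&
            Option.all (fun b => decide (PySem.Chars.find line.toList [c] < b)) none) = true := by
          simp [hi, Option.all]
        rw [hc, if_pos rfl, ih]
        simp [pvM, hi, pvOmin_none_left]
      | some b =>
        by_cases hib : PySem.Chars.find line.toList [c] < b
        · have hc : (PySem.Chars.find line.toList [c] != -1 &&
              Option.all (fun x => decide (PySem.Chars.find line.toList [c] < x)) (some b)) = true := by
            simp [hi, hib, Option.all]
          rw [hc, if_pos rfl, ih, pvM]
          simp only [if_neg hi]
          exact (pvOmin_absorb_lt b _ _ hib).symm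
        · have hc : (PySem.Chars.find line.toList [c] != -1 &&
              Option.all (fun x => decide (PySem.Chars.find line.toList [c] < x)) (some b)) = false := by
            simp [hib, Option.all]
          rw [hc, if_neg (by simp : ¬ (false = true)), ih, pvM]
          simp only [if_neg hi]
          exact (pvOmin_absorb_le b _ _ (by omega)).symm

-- ---- characterization of pvM ----
theorem pvM_none_iff (l : List Char) (inv : List Char) :
    pvM l inv = none ↔ ∀ c ∈ inv, c ∉ l := by
  induction inv with
  | nil => simp [pvM]
  | cons c rest ih =>
    simp only [pvM]
    by_cases hi : PySem.Chars.find l [c] = -1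
    · rw [if_pos hi, pvOmin_none_left, ih]
      have hcl := (pv_find_neg_iff l c).mp hi
      constructor
      · intro h x hx; rcases List.mem_cons.mp hx with rfl | hx'
        · exact hcl
        · exact h x hx'
      · intro h x hx; exact h x (List.mem_cons_of_mem _ hx)
    · rw [if_neg hi]
      constructor
      · intro h; cases hm : pvM l rest <;> simp [pvOmin, hm] at h
      · intro h
        exact absurd ((pv_find_neg_iff l c).mpr (h c List.mem_cons_self)) hi

theorem pvM_some_spec (l : List Char) (inv : List Char) (t : Int)
    (ht : pvM l inv = some t) :
    0 ≤ t ∧ (∃ c ∈ inv, l[t.toNat]? = some c) ∧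
    ∀ j < t.toNat, ∀ c ∈ inv, l[j]? ≠ some c := by
  induction inv generalizing t with
  | nil => simp [pvM] at ht
  | cons c rest ih =>
    simp only [pvM] at ht
    by_cases hi : PySem.Chars.find l [c] = -1
    · rw [if_pos hi, pvOmin_none_left] at ht
      obtain ⟨h0, ⟨c', hc', hg⟩, hmin⟩ := ih t ht
      have hcl := (pv_find_neg_iff l c).mp hi
      refine ⟨h0, ⟨c', List.mem_cons_of_mem _ hc', hg⟩, ?_⟩
      intro j hj x hx hge
      rcases List.mem_cons.mp hx with rfl | hx'
      · exact hcl (List.mem_of_getElem? hge)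
      · exact hmin j hj x hx' hge
    · obtain ⟨hnn, hgi, hmini⟩ := pv_find_spec l c hi
      rw [if_neg hi] at ht
      cases hm : pvM l rest with
      | none =>
        rw [hm] at ht
        simp [pvOmin] at ht
        subst ht
        have hrest := (pvM_none_iff l rest).mp hm
        refine ⟨hnn, ⟨c, List.mem_cons_self, hgi⟩, ?_⟩
        intro j hj x hx hge
        rcases List.mem_cons.mp hx with rfl | hx'
        · exact hmini j hj hge
        · exact hrest x hx' (List.mem_of_getElem? hge)
      | some t' =>
        rw [hm] at ht
        simp [pvOmin] at ht
        obtain ⟨h0', ⟨c', hc', hg'⟩, hmin'⟩ := ih t' hm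
        subst ht
        by_cases hle : PySem.Chars.find l [c] ≤ t'
        · rw [min_eq_left hle]
          refine ⟨hnn, ⟨c, List.mem_cons_self, hgi⟩, ?_⟩
          intro j hj x hx hge
          rcases List.mem_cons.mp hx with rfl | hx'
          · exact hmini j hj hge
          · exact hmin' j (by omega) x hx' hge
        · rw [min_eq_right (by omega)]
          refine ⟨h0', ⟨c', List.mem_cons_of_mem _ hc', hg'⟩, ?_⟩
          intro j hj x hx hge
          rcases List.mem_cons.mp hx with rfl | hx'
          · exact hmini j (by omega) hge
          · exact hmin' j hj x hx' hge

-- ---- the forward pass at the least index ----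
theorem pvGicFind_at (inv : List Char) (l : List Char) (j : Nat) (c : Char)
    (hg : l[j]? = some c) (hc : c ∈ inv)
    (hmin : ∀ j' < j, ∀ x ∈ inv, l[j']? ≠ some x) :
    pvGicFind inv l = some (String.ofList [c]) := by
  induction l generalizing j with
  | nil => simp at hg
  | cons a rest ih =>
    cases j with
    | zero =>
      simp at hg; subst hg
      simp [pvGicFind, hc]
    | succ k =>
      have ha : a ∉ inv := by
        intro hain
        exact hmin 0 (Nat.succ_pos k) a hain (by simp)
      simp only [pvGicFind, if_neg ha]
      exact ih k (by simpa using hg)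
        (fun j' hj' x hx hge => hmin (j' + 1) (by omega) x hx (by simpa using hge))

-- ---- glue: B's value equals the forward pass ----
theorem pvGicB_eq (line : String) (inv : String) :
    pvGicB line inv = pvGicFind inv.toList line.toList := by
  unfold pvGicB
  rw [pvBestLoop_eq, pvOmin_none_left]
  cases hm : pvM line.toList inv.toList with
  | none => exact (pvGicFind_none _ _ ((pvM_none_iff _ _).mp hm)).symm
  | some t =>
    obtain ⟨h0, ⟨c, hc, hg⟩, hmin⟩ := pvM_some_spec _ _ _ hm
    have ht : t = ((t.toNat : Nat) : Int) := by omega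
    show (PySem.Str.pyGet? line t).map (fun ch => String.ofList [ch]) = _
    rw [ht, PySem.Str.pyGet?_natCast, hg,
      pvGicFind_at inv.toList line.toList t.toNat c hg hc hmin]
    rfl

-- ===== VERDICT (by name: the statement is the Claim_ definition above) =====
theorem get_invalid_char_spec : Claim_equal_get_invalid_char := by
  intro line skip _
  unfold Spec_get_invalid_char get_invalid_char get_invalid_char_alt
  cases skip with
  | false =>
    simp only [Bool.false_eq_true, if_false]
    rw [pvGicB_eq]; exact pvGic_branch _ _
  | true =>
    simp only [if_true]
    by_cases h : PySem.Str.startswith (PySem.Str.strip line) "//" = true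
    · rw [if_pos h, if_pos h]
    · rw [if_neg h, if_neg h]; rw [pvGicB_eq]; exact pvGic_branch _ _
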